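-- pv_equiv track=rewrite | github.com/ffaltings/InteractiveTextGeneration | infosol/alignment.py | get_adjacent_ops
-- ===== SOURCE A (Python) =====
-- def get_adjacent_ops(idxs, alignment, adj_range = 1):
--     """
--     Return idxs of adjacent ops in alignment. Adjacent idxs are idxs
--     that are near a pair of matched tokens (not necessarily an exact match)
--     """
--     def is_adjacent(idx, adj_range):
--         if idx < adj_range: # "adjacent to start token"
--             return True
--         min_lim = max(0, idx - adj_range)
--         max_lim = min(len(alignment), idx + adj_range + 1)
--         for i in range(min_lim, max_lim):
--             if alignment[i][0] != '' and alignment[i][1] != '': # matched tokens?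
--                 return True
--         return False
--     ret_idxs = [i for i in idxs if is_adjacent(i, adj_range)]
--     return ret_idxs
-- ===== SOURCE B (Python) =====
-- def get_adjacent_ops(idxs, alignment, adj_range = 1):
--     # Precompute prefix counts of matched pairs; each window test is O(1).
--     n = len(alignment)
--     pref = [0] * (n + 1)
--     for i, (s, t) in enumerate(alignment):
--         pref[i + 1] = pref[i] + (1 if s != '' and t != '' else 0)
--     def near(idx):
--         if idx < adj_range:
--             return True
--         lo = min(n, max(0, idx - adj_range))
--         hi = min(n, max(0, idx + adj_range + 1))
--         return pref[hi] - pref[lo] > 0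
--     return [i for i in idxs if near(i)]
-- ===== Notes on version B (the rewrite author's own statement) =====
-- stated objective: alternative
-- what changed: Replaces A's per-index window rescan over alignment with a prefix-sum table of matched-pair counts built once, so each index is decided by one subtraction of two table entries instead of an inner loop.
import Mathlib
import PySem

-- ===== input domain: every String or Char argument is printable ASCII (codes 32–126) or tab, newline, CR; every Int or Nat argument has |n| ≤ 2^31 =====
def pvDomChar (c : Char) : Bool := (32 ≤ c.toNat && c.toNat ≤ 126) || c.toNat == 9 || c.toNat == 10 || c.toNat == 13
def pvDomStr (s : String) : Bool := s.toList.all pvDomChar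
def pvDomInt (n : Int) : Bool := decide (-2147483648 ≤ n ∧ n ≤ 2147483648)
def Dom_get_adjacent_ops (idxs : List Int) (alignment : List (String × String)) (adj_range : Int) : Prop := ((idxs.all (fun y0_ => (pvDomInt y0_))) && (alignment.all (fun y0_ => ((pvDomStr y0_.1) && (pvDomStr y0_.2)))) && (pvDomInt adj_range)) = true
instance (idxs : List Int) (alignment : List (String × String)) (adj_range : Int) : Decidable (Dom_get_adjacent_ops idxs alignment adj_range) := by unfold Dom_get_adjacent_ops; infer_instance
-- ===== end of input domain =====

-- B replaces A's per-index window rescan by a prefix-sum table of matched-pair counts built once.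

-- ===== PORT A =====
-- alignment[i][0] != '' and alignment[i][1] != ''  (shared matched-pair test)
def pvMatched (p : String × String) : Bool := p.1 != "" && p.2 != ""

-- the inner 'is_adjacent' closure of A; the for-loop with early 'return True' is List.any over the range
def pvIsAdjacentA (alignment : List (String × String)) (idx adj_range : Int) : Bool :=
  if idx < adj_range then true
  else
    let min_lim : Int := max 0 (idx - adj_range)
    let max_lim : Int := min (alignment.length : Int) (idx + adj_range + 1)
    (PySem.List.pyRange min_lim max_lim 1).any
      (fun i => pvMatched (PySem.List.pyGetD alignment i ("", "")))

def get_adjacent_ops (idxs : List Int) (alignment : List (String × String)) (adj_range : Int) : List Int :=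
  idxs.filter (fun i => pvIsAdjacentA alignment i adj_range)

-- ===== PORT B =====
-- builds the prefix-count list: result[k] = s + number of matched pairs among the first k entries
def pvBuildPref : List (String × String) → Int → List Int
  | [], s => [s]
  | p :: rest, s => s :: pvBuildPref rest (s + (if pvMatched p then 1 else 0))

def get_adjacent_ops_alt (idxs : List Int) (alignment : List (String × String)) (adj_range : Int) : List Int :=
  let n : Int := alignment.length
  let pref : List Int := pvBuildPref alignment 0
  idxs.filter (fun idx =>
    if idx < adj_range then true
    else
      let lo : Int := min n (max 0 (idx - adj_range))
      let hi : Int := min n (max 0 (idx + adj_range + 1))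
      decide (pref.getD hi.toNat 0 - pref.getD lo.toNat 0 > 0))

-- ===== PRECONDITION & SPEC =====
def Spec_get_adjacent_ops (idxs : List Int) (alignment : List (String × String)) (adj_range : Int) (out : List Int) : Prop := out = get_adjacent_ops_alt idxs alignment adj_range
instance (idxs : List Int) (alignment : List (String × String)) (adj_range : Int) (out : List Int) : Decidable (Spec_get_adjacent_ops idxs alignment adj_range out) := by unfold Spec_get_adjacent_ops; infer_instance

-- ===== CLAIM (what is proved, stated in full; the proofs are below) =====
def Claim_equal_get_adjacent_ops : Prop := ∀ (idxs : List Int) (alignment : List (String × String)) (adj_range : Int), Dom_get_adjacent_ops idxs alignment adj_range → Spec_get_adjacent_ops idxs alignment adj_range (get_adjacent_ops idxs alignment adj_range)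

-- ===== LEMMAS AND PROOFS =====

-- the prefix list computes prefix match-counts
theorem pvBuildPref_getD (al : List (String × String)) (s : Int) (k : Nat) (hk : k ≤ al.length) :
    (pvBuildPref al s).getD k 0 = s + ((al.take k).countP pvMatched : Int) := by
  induction al generalizing s k with
  | nil =>
    have hk0 : k = 0 := Nat.le_zero.mp hk
    subst hk0
    simp [pvBuildPref]
  | cons p rest ih =>
    cases k with
    | zero => simp [pvBuildPref]
    | succ k =>
      have hk' : k ≤ rest.length := by simpa using hk
      simp only [pvBuildPref, List.getD_cons_succ, List.take_succ_cons, List.countP_cons,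
        ih _ _ hk']
      split_ifs with h <;> simp <;> try ring

theorem countP_take_mono (al : List (String × String)) (a b : Nat) (hab : a ≤ b) :
    (al.take a).countP pvMatched ≤ (al.take b).countP pvMatched := by
  have hsub : (al.take a).Sublist (al.take b) := by
    have := List.take_sublist a (al.take b)
    rwa [List.take_take, Nat.min_eq_left hab] at this
  exact hsub.countP_le

-- the main per-index equality
theorem pvIsAdj_eq (al : List (String × String)) (idx adj : Int) :
    pvIsAdjacentA al idx adj =
      (if idx < adj then true
       else
        let n : Int := al.length
        let lo : Int := min n (max 0 (idx - adj))
        let hi : Int := min n (max 0 (idx + adj + 1))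
        decide ((pvBuildPref al 0).getD hi.toNat 0 - (pvBuildPref al 0).getD lo.toNat 0 > 0)) := by
  unfold pvIsAdjacentA
  split_ifs with h
  · rfl
  · -- else branch
    change (PySem.List.pyRange (max 0 (idx - adj)) (min (al.length : Int) (idx + adj + 1)) 1).any
        (fun i => pvMatched (PySem.List.pyGetD al i ("", ""))) =
      decide ((pvBuildPref al 0).getD (min (al.length : Int) (max 0 (idx + adj + 1))).toNat 0
        - (pvBuildPref al 0).getD (min (al.length : Int) (max 0 (idx - adj))).toNat 0 > 0)
    set N : Int := (al.length : Int) with hN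
    have hN0 : 0 ≤ N := by positivity
    set a : Int := max 0 (idx - adj) with ha
    set b : Int := min N (idx + adj + 1) with hb
    set lo : Int := min N (max 0 (idx - adj)) with hlo
    set hi : Int := min N (max 0 (idx + adj + 1)) with hhi
    have ha0 : 0 ≤ a := le_max_left _ _
    have hbN : b ≤ N := min_le_left _ _
    have hlo0 : 0 ≤ lo := by omega
    have hhi0 : 0 ≤ hi := by omega
    have hloN : lo ≤ N := by omega
    have hhiN : hi ≤ N := by omega
    have hloNat : lo.toNat ≤ al.length := by omega
    have hhiNat : hi.toNat ≤ al.length := by omega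
    rw [pvBuildPref_getD _ _ _ hhiNat, pvBuildPref_getD _ _ _ hloNat]
    simp only [zero_add]
    by_cases hord : b ≤ a
    · -- empty window: range empty, and hi ≤ lo so the count difference is ≤ 0
      rw [PySem.List.pyRange_one_eq_nil hord]
      have hhilo : hi.toNat ≤ lo.toNat := by omega
      have := countP_take_mono al hi.toNat lo.toNat hhilo
      simp only [List.any_nil]
      symm
      simpa using by omega
    · rw [not_le] at hord
      have hab : a < b := hord
      have hloa : lo = a := by omega
      have hhib : hi = b := by omega
      rw [hloa, hhib]
      have habN : a.toNat ≤ b.toNat := by omega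
      -- split take b as take a ++ segment
      have hsplit : al.take b.toNat = al.take a.toNat ++ (al.take b.toNat).drop a.toNat := by
        conv_lhs => rw [← List.take_append_drop a.toNat (al.take b.toNat)]
        rw [List.take_take, Nat.min_eq_left habN]
      set seg := (al.take b.toNat).drop a.toNat with hseg
      have hcnt : (al.take b.toNat).countP pvMatched
          = (al.take a.toNat).countP pvMatched + seg.countP pvMatched := by
        conv_lhs => rw [hsplit]
        rw [List.countP_append]
      have hsegexists : (0 < seg.countP pvMatched) ↔ ∃ x ∈ seg, pvMatched x :=
        List.countP_pos_iff
      have hseg_len : seg.length = b.toNat - a.toNat := by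
        simp only [hseg, List.length_drop, List.length_take]
        omega
      have hmain : ((PySem.List.pyRange a b 1).any
            (fun i => pvMatched (PySem.List.pyGetD al i ("", ""))) = true)
          ↔ ∃ x ∈ seg, pvMatched x := by
        rw [List.any_eq_true]
        constructor
        · rintro ⟨i, hi1, hi2⟩
          rw [PySem.List.mem_pyRange_one] at hi1
          obtain ⟨hli, hih⟩ := hi1
          have hi0' : 0 ≤ i := le_trans ha0 hli
          have hiN : i < N := lt_of_lt_of_le hih hbN
          rw [PySem.List.pyGetD_eq_getElem al ("", "") hi0' (by simpa [hN] using hiN)] at hi2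
          refine ⟨al[i.toNat], ?_, hi2⟩
          have hjlt : i.toNat - a.toNat < seg.length := by omega
          refine (List.mem_iff_getElem).mpr ⟨i.toNat - a.toNat, hjlt, ?_⟩
          simp only [hseg, List.getElem_drop, List.getElem_take]
          congr 1
          omega
        · rintro ⟨x, hx, hmx⟩
          obtain ⟨j, hj, hjx⟩ := List.mem_iff_getElem.mp hx
          refine ⟨a + (j : Int), ?_, ?_⟩
          · rw [PySem.List.mem_pyRange_one]
            omega
          · have h0 : 0 ≤ a + (j : Int) := by omega
            have hlt : a + (j : Int) < (al.length : Int) := by omega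
            rw [PySem.List.pyGetD_eq_getElem al ("", "") h0 hlt]
            have hgj : al[(a + (j : Int)).toNat]'(by omega) = seg[j] := by
              simp only [hseg, List.getElem_drop, List.getElem_take]
              congr 1
              omega
            rw [hgj, hjx]
            exact hmx
      rw [show ((al.take b.toNat).countP pvMatched : Int)
            - (al.take a.toNat).countP pvMatched = (seg.countP pvMatched : Int) by omega]
      by_cases hex : ∃ x ∈ seg, pvMatched x
      · rw [hmain.mpr hex]
        have h2 : ((seg.countP pvMatched : Int) > 0) := by exact_mod_cast hsegexists.mpr hex
        exact (decide_eq_true h2).symm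
      · have h1 : ¬ ((PySem.List.pyRange a b 1).any
            (fun i => pvMatched (PySem.List.pyGetD al i ("", ""))) = true) :=
          fun hh => hex (hmain.mp hh)
        have h2 : ¬ (0 < seg.countP pvMatched) := fun hh => hex (hsegexists.mp hh)
        simp only [Bool.not_eq_true] at h1
        rw [h1]
        have h3 : ¬ ((seg.countP pvMatched : Int) > 0) := by exact_mod_cast h2
        exact (decide_eq_false h3).symm

-- ===== VERDICT (by name: the statement is the Claim_ definition above) =====
theorem get_adjacent_ops_spec : Claim_equal_get_adjacent_ops := by
  intro idxs alignment adj_range _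
  unfold Spec_get_adjacent_ops get_adjacent_ops get_adjacent_ops_alt
  simp only
  apply List.filter_congr
  intro i _
  exact pvIsAdj_eq alignment i adj_range
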